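-- pv_equiv track=rewrite | github.com/kadenas/Dimitri_4000 | sip_manager.py | _route_set_from_record_route
-- ===== SOURCE A (Python) =====
-- def _route_set_from_record_route(rr_header: str) -> list[str]:
--     """Return a route set (reversed) from a Record-Route header value."""
--     if not rr_header:
--         return []
--     parts = []
--     current = []
--     depth = 0
--     for ch in rr_header:
--         if ch == ',' and depth == 0:
--             part = ''.join(current).strip()
--             if part:
--                 parts.append(part)
--             current = []
--             continue
--         if ch == '<':
--             depth += 1
--         elif ch == '>':
--             if depth > 0:
--                 depth -= 1
--         current.append(ch)
--     part = ''.join(current).strip()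
--     if part:
--         parts.append(part)
--     return list(reversed(parts))
-- ===== SOURCE B (Python) =====
-- def _route_set_from_record_route(rr_header: str) -> list[str]:
--     """Return a route set (reversed) from a Record-Route header value."""
--     result = []
--     depth = 0
--     start = 0
--     for i, ch in enumerate(rr_header):
--         if ch == ',' and depth == 0:
--             seg = rr_header[start:i].strip()
--             if seg:
--                 result.insert(0, seg)
--             start = i + 1
--         elif ch == '<':
--             depth += 1
--         elif ch == '>' and depth > 0:
--             depth -= 1
--     seg = rr_header[start:].strip()
--     if seg:
--         result.insert(0, seg)
--     return result
-- ===== Notes on version B (the rewrite author's own statement) =====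
-- stated objective: simpler
-- what changed: Replaces A's per-character accumulator list with join/strip/append plus a final reverse by index-based slicing of the header at top-level commas with each stripped segment prepended to the result, so there is no character buffer and no final reversal (and no empty-string guard).
import Mathlib
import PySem

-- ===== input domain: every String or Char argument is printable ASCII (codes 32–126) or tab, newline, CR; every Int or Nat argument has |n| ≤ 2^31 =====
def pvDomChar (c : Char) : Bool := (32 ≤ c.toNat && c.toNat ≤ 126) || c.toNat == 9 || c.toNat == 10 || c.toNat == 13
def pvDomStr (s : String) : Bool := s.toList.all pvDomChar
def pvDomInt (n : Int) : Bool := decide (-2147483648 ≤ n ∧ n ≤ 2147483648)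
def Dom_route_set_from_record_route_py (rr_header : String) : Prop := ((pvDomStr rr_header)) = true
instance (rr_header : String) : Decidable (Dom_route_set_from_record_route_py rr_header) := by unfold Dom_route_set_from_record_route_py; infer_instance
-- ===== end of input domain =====

-- B replaces A's character-accumulator ('current' list + join + final reverse) by index
-- slicing with segments PREPENDED to the result, so no buffer and no final reversal (objective: simpler).

-- ===== PORT A =====
-- state: (parts, current, depth), exactly A's loop body
def pvAstep (st : List String × List Char × Nat) (ch : Char) : List String × List Char × Nat :=
  match st with
  | (parts, current, depth) =>
    if ch = ',' ∧ depth = 0 then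
      let part := String.ofList (PySem.Chars.strip current)
      ((if part ≠ "" then parts ++ [part] else parts), [], depth)
    else
      let depth' := if ch = '<' then depth + 1
        else if ch = '>' then (if depth > 0 then depth - 1 else depth) else depth
      (parts, current ++ [ch], depth')

def route_set_from_record_route_py (rr_header : String) : List String :=
  if rr_header = "" then []
  else
    let st := rr_header.toList.foldl pvAstep ([], [], 0)
    let part := String.ofList (PySem.Chars.strip st.2.1)
    (if part ≠ "" then st.1 ++ [part] else st.1).reverse

-- ===== PORT B =====
-- state: (result, start, depth), exactly B's loop body over enumerate(rr_header)
def pvBstep (cs : List Char) (st : List String × Int × Nat) (p : Int × Char) : List String × Int × Nat :=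
  match st, p with
  | (result, start, depth), (i, ch) =>
    if ch = ',' ∧ depth = 0 then
      let seg := String.ofList (PySem.Chars.strip (PySem.List.slice cs (some start) (some i)))
      ((if seg ≠ "" then seg :: result else result), i + 1, depth)
    else if ch = '<' then (result, start, depth + 1)
    else if ch = '>' ∧ depth > 0 then (result, start, depth - 1)
    else (result, start, depth)

def route_set_from_record_route_py_alt (rr_header : String) : List String :=
  let cs := rr_header.toList
  let st := (PySem.List.enumerate cs 0).foldl (pvBstep cs) ([], 0, 0)
  let seg := String.ofList (PySem.Chars.strip (PySem.List.slice cs (some st.2.1) none))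
  if seg ≠ "" then seg :: st.1 else st.1

-- ===== PRECONDITION & SPEC =====
def Spec_route_set_from_record_route_py (rr_header : String) (out : List String) : Prop := out = route_set_from_record_route_py_alt rr_header
instance (rr_header : String) (out : List String) : Decidable (Spec_route_set_from_record_route_py rr_header out) := by unfold Spec_route_set_from_record_route_py; infer_instance

-- ===== CLAIM (what is proved, stated in full; the proofs are below) =====
def Claim_equal_route_set_from_record_route_py : Prop := ∀ (rr_header : String), Dom_route_set_from_record_route_py rr_header → Spec_route_set_from_record_route_py rr_header (route_set_from_record_route_py rr_header)

-- ===== LEMMAS AND PROOFS =====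
def pvFinA (st : List String × List Char × Nat) : List String :=
  (if String.ofList (PySem.Chars.strip st.2.1) ≠ "" then st.1 ++ [String.ofList (PySem.Chars.strip st.2.1)] else st.1).reverse

def pvFinB (cs : List Char) (st : List String × Int × Nat) : List String :=
  let seg := String.ofList (PySem.Chars.strip (PySem.List.slice cs (some st.2.1) none))
  if seg ≠ "" then seg :: st.1 else st.1

lemma pv_slice_pre (cs pre rest : List Char) (start : Nat) (hcs : cs = pre ++ rest)
    (hs : start ≤ pre.length) :
    PySem.List.slice cs (some (start : Int)) (some (pre.length : Int)) = pre.drop start := by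
  subst hcs
  rw [PySem.List.slice_natCast]
  rw [List.drop_append_of_le_length hs]
  have h : (pre.drop start).length = pre.length - start := List.length_drop ..
  rw [← h, List.take_left]

lemma pv_main (rest : List Char) : ∀ (cs pre : List Char) (parts : List String)
    (current : List Char) (depth start : Nat),
    cs = pre ++ rest → start ≤ pre.length → current = pre.drop start →
    pvFinA (rest.foldl pvAstep (parts, current, depth))
      = pvFinB cs ((PySem.List.enumerate rest (pre.length : Int)).foldl (pvBstep cs)
          (parts.reverse, (start : Int), depth)) := by
  induction rest with
  | nil =>
    intro cs pre parts current depth start hcs hs hc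
    simp only [List.foldl_nil, PySem.List.enumerate_nil, pvFinA, pvFinB]
    have hslice : PySem.List.slice cs (some (start : Int)) none = current := by
      rw [PySem.List.slice_from_natCast, hcs, List.append_nil, hc]
    rw [hslice]
    by_cases h : String.ofList (PySem.Chars.strip current) = ""
    · simp [h]
    · simp [h]
  | cons ch rest ih =>
    intro cs pre parts current depth start hcs hs hc
    rw [PySem.List.enumerate_cons]
    simp only [List.foldl_cons]
    have hcs' : cs = (pre ++ [ch]) ++ rest := by simp [hcs]
    by_cases hcomma : ch = ',' ∧ depth = 0
    · have hA : pvAstep (parts, current, depth) ch =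
        ((if String.ofList (PySem.Chars.strip current) ≠ "" then parts ++ [String.ofList (PySem.Chars.strip current)] else parts), [], depth) := by
        simp [pvAstep, hcomma]
      have hseg : PySem.List.slice cs (some (start : Int)) (some (pre.length : Int)) = current := by
        rw [pv_slice_pre cs pre (ch :: rest) start hcs hs, hc]
      have hB : pvBstep cs (parts.reverse, (start : Int), depth) ((pre.length : Int), ch) =
        ((if String.ofList (PySem.Chars.strip current) ≠ "" then String.ofList (PySem.Chars.strip current) :: parts.reverse else parts.reverse), (pre.length : Int) + 1, depth) := by
        simp only [pvBstep, hseg]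
        simp [hcomma]
      rw [hA, hB]
      have hrev : (if String.ofList (PySem.Chars.strip current) ≠ "" then parts ++ [String.ofList (PySem.Chars.strip current)] else parts).reverse
          = (if String.ofList (PySem.Chars.strip current) ≠ "" then String.ofList (PySem.Chars.strip current) :: parts.reverse else parts.reverse) := by
        by_cases h : String.ofList (PySem.Chars.strip current) = "" <;> simp [h]
      have hlen : ((pre.length : Int) + 1) = (((pre ++ [ch]).length : Nat) : Int) := by
        simp
      rw [← hrev, hlen]
      exact ih cs (pre ++ [ch]) _ [] depth (pre ++ [ch]).length hcs' (le_refl _) (by simp)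
    · have hA : pvAstep (parts, current, depth) ch =
        (parts, current ++ [ch],
         if ch = '<' then depth + 1 else if ch = '>' then (if depth > 0 then depth - 1 else depth) else depth) := by
        simp [pvAstep, hcomma]
      have hB : pvBstep cs (parts.reverse, (start : Int), depth) ((pre.length : Int), ch) =
        (parts.reverse, (start : Int),
         if ch = '<' then depth + 1 else if ch = '>' then (if depth > 0 then depth - 1 else depth) else depth) := by
        by_cases h1 : ch = '<'
        · simp [pvBstep, h1]
        · by_cases h2 : ch = '>'
          · by_cases h3 : depth > 0 <;> simp [pvBstep, h2, h3]
          · simp [pvBstep, hcomma, h1, h2]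
      rw [hA, hB]
      have hlen : (pre.length : Int) + 1 = (((pre ++ [ch]).length : Nat) : Int) := by
        simp
      rw [hlen]
      exact ih cs (pre ++ [ch]) parts (current ++ [ch]) _ start hcs'
        (by simp; omega) (by rw [List.drop_append_of_le_length hs, hc])

-- ===== VERDICT (by name: the statement is the Claim_ definition above) =====
theorem route_set_from_record_route_py_spec : Claim_equal_route_set_from_record_route_py := by
  intro rr_header _
  unfold Spec_route_set_from_record_route_py
  by_cases h : rr_header = ""
  · subst h; decide
  · have hmain := pv_main rr_header.toList rr_header.toList [] [] [] 0 0 rfl (by simp) (by simp)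
    simp only [route_set_from_record_route_py, route_set_from_record_route_py_alt, h]
    simpa [pvFinA, pvFinB] using hmain
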